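-- pv_equiv track=rewrite | github.com/MrBrantCode/unitest_baseline | mut_generate/mist_train_taco/taco_3769/solution.py | find_value_in_sequence
-- ===== SOURCE A (Python) =====
-- from bisect import bisect_left
--
-- def find_value_in_sequence(sequence, queries):
--     # Append a large value to the sequence to handle edge cases
--     sequence.append(1000000001)
--
--     results = []
--     for k in queries:
--         p = bisect_left(sequence, k)
--         if sequence[p] == k:
--             results.append(1)
--         else:
--             results.append(0)
--
--     return results
-- ===== SOURCE B (Python) =====
-- def find_value_in_sequence(sequence, queries):
--     # Same in-place append of the sentinel as A (observable mutation kept)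
--     sequence.append(1000000001)
--
--     def hit(lo, n, k):
--         # search the window [lo, lo+n); base case fuses the membership test
--         if n == 0:
--             return 1 if sequence[lo] == k else 0
--         half = n // 2
--         if sequence[lo + half] < k:
--             return hit(lo + half + 1, n - half - 1, k)
--         return hit(lo, half, k)
--
--     size = len(sequence)
--     return [hit(0, size, k) for k in queries]
-- ===== Notes on version B (the rewrite author's own statement) =====
-- stated objective: alternative
-- what changed: Replaces the library bisect_left (a two-bounds while loop) followed by a separate indexed comparison with a recursive count-halving search carrying (position, window size) whose base case fuses the membership comparison; it performs the same comparisons, so it matches A even on unsorted input.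
import Mathlib
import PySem

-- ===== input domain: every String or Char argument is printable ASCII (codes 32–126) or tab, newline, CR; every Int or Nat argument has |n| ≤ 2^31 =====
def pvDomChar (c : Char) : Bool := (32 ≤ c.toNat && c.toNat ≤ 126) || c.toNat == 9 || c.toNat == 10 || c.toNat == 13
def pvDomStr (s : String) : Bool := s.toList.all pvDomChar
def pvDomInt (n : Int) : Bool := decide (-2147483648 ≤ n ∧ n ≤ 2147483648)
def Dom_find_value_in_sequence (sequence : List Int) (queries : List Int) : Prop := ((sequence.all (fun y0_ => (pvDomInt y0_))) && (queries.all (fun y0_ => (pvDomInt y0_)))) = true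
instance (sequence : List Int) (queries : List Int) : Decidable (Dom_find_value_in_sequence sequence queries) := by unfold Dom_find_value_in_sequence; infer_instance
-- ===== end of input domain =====

-- B replaces the library bisect_left (two-bounds loop) + indexed comparison by a recursive
-- count-halving search that fuses the membership test into its base case; same comparisons, so
-- it matches A on every input. Both append the sentinel to `sequence` in place — the
-- equivalence proved is about the return value.


-- ===== PORT A =====
-- bisect.bisect_left: lo=0, hi=len; while lo<hi: mid=(lo+hi)//2; if a[mid]<x: lo=mid+1 else: hi=mid
def bisectLeft (a : List Int) (x : Int) (lo hi : Nat) : Nat :=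
  if _h : lo < hi then
    let mid := (lo + hi) / 2
    if a.getD mid 0 < x then bisectLeft a x (mid + 1) hi
    else bisectLeft a x lo mid
  else lo
termination_by hi - lo
decreasing_by all_goals omega

def find_value_in_sequence (sequence : List Int) (queries : List Int) : List Int :=
  let seq' := sequence ++ [1000000001]
  -- the results loop; sequence[p] ported as getD (p is in range inside Pre_; A raises outside)
  queries.map (fun k =>
    let p := bisectLeft seq' k 0 seq'.length
    if seq'.getD p 0 = k then 1 else 0)

-- ===== PORT B =====
-- hit(lo, n, k): recursive search of the window [lo, lo+n); the base case is the membership test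
-- (sequence[lo] ported as getD: in range inside Pre_; B raises outside, exactly like A)
def hitB (a : List Int) (k : Int) (lo n : Nat) : Int :=
  if n = 0 then (if a.getD lo 0 = k then 1 else 0)
  else
    if a.getD (lo + n / 2) 0 < k then hitB a k (lo + n / 2 + 1) (n - n / 2 - 1)
    else hitB a k lo (n / 2)
termination_by n
decreasing_by all_goals omega

def find_value_in_sequence_alt (sequence : List Int) (queries : List Int) : List Int :=
  let seq' := sequence ++ [1000000001]
  let size := seq'.length
  queries.map (fun k => hitB seq' k 0 size)

-- ===== PRECONDITION & SPEC =====
-- Pre_ excludes exactly the queries above the appended sentinel 1000000001, on which both A and B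
-- raise IndexError (the search lands one past the end of the list).
def Pre_find_value_in_sequence (sequence : List Int) (queries : List Int) : Prop :=
  ∀ k ∈ queries, k ≤ 1000000001
instance (sequence : List Int) (queries : List Int) : Decidable (Pre_find_value_in_sequence sequence queries) := by unfold Pre_find_value_in_sequence; infer_instance

def pvWitness_find_value_in_sequence : List Int × List Int := ([1, 3, 5], [0, 1, 4, 5])

def Spec_find_value_in_sequence (sequence : List Int) (queries : List Int) (out : List Int) : Prop := out = find_value_in_sequence_alt sequence queries
instance (sequence : List Int) (queries : List Int) (out : List Int) : Decidable (Spec_find_value_in_sequence sequence queries out) := by unfold Spec_find_value_in_sequence; infer_instance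

-- ===== CLAIM (what is proved, stated in full; the proofs are below) =====
def Claim_equal_find_value_in_sequence : Prop := ∀ (sequence : List Int) (queries : List Int), Dom_find_value_in_sequence sequence queries → Pre_find_value_in_sequence sequence queries → Spec_find_value_in_sequence sequence queries (find_value_in_sequence sequence queries)

-- ===== LEMMAS AND PROOFS =====

-- hitB's recursion visits exactly bisect_left's midpoints: the window [lo, lo+n) corresponds to the
-- bounds (lo, lo+n), since (lo + (lo+n))/2 = lo + n/2. So hitB equals "compare a[bisect] with k".
theorem hitB_eq_bisect (a : List Int) (k : Int) :
    ∀ n lo : Nat, hitB a k lo n = (if a.getD (bisectLeft a k lo (lo + n)) 0 = k then 1 else 0) := by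
  intro n
  induction n using Nat.strong_induction_on with
  | _ n IH =>
    intro lo
    by_cases h0 : n = 0
    · subst h0
      rw [hitB, if_pos rfl, bisectLeft]
      simp
    · have hmid : (lo + (lo + n)) / 2 = lo + n / 2 := by omega
      rw [hitB, if_neg h0, bisectLeft, dif_pos (by omega : lo < lo + n)]
      simp only [hmid]
      by_cases hc : a.getD (lo + n / 2) 0 < k
      · rw [if_pos hc, if_pos hc]
        have harith : lo + n = (lo + n / 2 + 1) + (n - n / 2 - 1) := by omega
        rw [harith]
        exact IH (n - n / 2 - 1) (by omega) (lo + n / 2 + 1)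
      · rw [if_neg hc, if_neg hc]
        have := IH (n / 2) (by omega) lo
        rw [this]

-- ===== VERDICT (by name: the statement is the Claim_ definition above) =====
theorem find_value_in_sequence_spec : Claim_equal_find_value_in_sequence := by
  intro sequence queries _ _
  unfold Spec_find_value_in_sequence find_value_in_sequence find_value_in_sequence_alt
  simp only
  apply List.map_congr_left
  intro k _
  rw [hitB_eq_bisect]
  simp
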